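-- pv_equiv track=rewrite | github.com/duytan9821/auto_grade_X | main.py | xacdinh_da
-- ===== SOURCE A (Python) =====
-- def xacdinh_da(values, max_diff=10):
--     groups, current_group, zero_group, multiple_groups = [], [], [], []
--     for value in values:
--         if value[1] == 0:
--             zero_group.append(value)
--         elif value[1] == -1:
--             multiple_groups.append(value)
--         else:
--             if not current_group or value[1] - current_group[-1][1] <= max_diff:
--                 current_group.append(value)
--             else:
--                 groups.append(current_group)
--                 current_group = [value]
--     if current_group:
--         groups.append(current_group)
--     return groups, zero_group, multiple_groups
-- ===== SOURCE B (Python) =====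
-- def xacdinh_da(values, max_diff=10):
--     zero_group = [v for v in values if v[1] == 0]
--     multiple_groups = [v for v in values if v[1] == -1]
--     normal = [v for v in values if v[1] != 0 and v[1] != -1]
--     # a group boundary falls exactly between adjacent normal elements whose gap exceeds max_diff
--     cuts = [i + 1 for i, (a, b) in enumerate(zip(normal, normal[1:])) if b[1] - a[1] > max_diff]
--     bounds = [0] + cuts + [len(normal)]
--     groups = [normal[a:b] for a, b in zip(bounds, bounds[1:])] if normal else []
--     return groups, zero_group, multiple_groups
-- ===== Notes on version B (the rewrite author's own statement) =====
-- stated objective: alternative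
-- what changed: B has no running current_group/flush state: it filters the zero/-1 buckets, computes the group cut indices in one comprehension over adjacent pairs of the remaining normal values (a cut exactly where the gap exceeds max_diff), and materializes each group as a slice between consecutive bounds.
import Mathlib
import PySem

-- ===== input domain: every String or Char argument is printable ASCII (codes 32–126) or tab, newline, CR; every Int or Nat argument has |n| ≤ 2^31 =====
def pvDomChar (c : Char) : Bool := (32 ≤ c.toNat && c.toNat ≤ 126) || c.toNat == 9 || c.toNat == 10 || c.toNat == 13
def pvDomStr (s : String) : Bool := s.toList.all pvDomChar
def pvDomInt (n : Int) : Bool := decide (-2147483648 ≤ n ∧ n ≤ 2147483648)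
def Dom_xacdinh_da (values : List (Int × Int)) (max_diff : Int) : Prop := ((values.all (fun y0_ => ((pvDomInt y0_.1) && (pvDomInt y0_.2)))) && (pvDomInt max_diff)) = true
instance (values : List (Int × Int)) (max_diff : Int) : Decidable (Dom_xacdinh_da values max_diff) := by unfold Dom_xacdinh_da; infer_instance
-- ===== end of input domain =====

-- B computes the group cut indices from adjacent pairs of the filtered normal values and materializes the groups as slices, instead of A's running current_group/flush loop; objective: alternative.


-- ===== PORT A =====
-- A's single loop, as structural recursion over the remaining values with the four lists as state.
def xaLoop (max_diff : Int) : List (Int × Int) → List (List (Int × Int)) → List (Int × Int) → List (Int × Int) → List (Int × Int) → (List (List (Int × Int))) × (List (Int × Int)) × (List (Int × Int))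
  | [], g, c, z, m => (if c = [] then g else g ++ [c], z, m)
  | v :: rest, g, c, z, m =>
    if v.2 = 0 then xaLoop max_diff rest g c (z ++ [v]) m
    else if v.2 = -1 then xaLoop max_diff rest g c z (m ++ [v])
    else if c = [] ∨ v.2 - ((c.getLast?.getD (0, 0)).2) ≤ max_diff then
      xaLoop max_diff rest g (c ++ [v]) z m
    else
      xaLoop max_diff rest (g ++ [c]) [v] z m

def xacdinh_da (values : List (Int × Int)) (max_diff : Int) : (List (List (Int × Int))) × (List (Int × Int)) × (List (Int × Int)) :=
  xaLoop max_diff values [] [] [] []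

-- ===== PORT B =====
-- B: filter the three streams; a cut falls exactly between adjacent normal elements whose
-- gap exceeds max_diff; the groups are the slices of `normal` between consecutive bounds.
def xacdinh_da_alt (values : List (Int × Int)) (max_diff : Int) : (List (List (Int × Int))) × (List (Int × Int)) × (List (Int × Int)) :=
  let zero_group := values.filter (fun v => v.2 = 0)
  let multiple_groups := values.filter (fun v => v.2 = -1)
  let normal := values.filter (fun v => v.2 ≠ 0 ∧ v.2 ≠ -1)
  let cuts : List Int :=
    ((PySem.List.enumerate (normal.zip normal.tail) 0).filter
      (fun p => decide (p.2.2.2 - p.2.1.2 > max_diff))).map (fun p => p.1 + 1)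
  let bounds : List Int := 0 :: (cuts ++ [(normal.length : Int)])
  let groups := if normal = [] then [] else
    (bounds.zip bounds.tail).map (fun ab => PySem.List.slice normal (some ab.1) (some ab.2))
  (groups, zero_group, multiple_groups)

-- ===== PRECONDITION & SPEC =====
def Spec_xacdinh_da (values : List (Int × Int)) (max_diff : Int) (out : (List (List (Int × Int))) × (List (Int × Int)) × (List (Int × Int))) : Prop := out = xacdinh_da_alt values max_diff
instance (values : List (Int × Int)) (max_diff : Int) (out : (List (List (Int × Int))) × (List (Int × Int)) × (List (Int × Int))) : Decidable (Spec_xacdinh_da values max_diff out) := by unfold Spec_xacdinh_da; infer_instance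

-- ===== CLAIM (what is proved, stated in full; the proofs are below) =====
def Claim_equal_xacdinh_da : Prop := ∀ (values : List (Int × Int)) (max_diff : Int), Dom_xacdinh_da values max_diff → Spec_xacdinh_da values max_diff (xacdinh_da values max_diff)

-- ===== LEMMAS AND PROOFS =====

-- the common reference point: grouping as structural recursion on the normal values
def gRec (md : Int) : List (Int × Int) → List (List (Int × Int))
  | [] => []
  | [v] => [[v]]
  | v :: u :: t =>
    if u.2 - v.2 > md then [v] :: gRec md (u :: t)
    else
      match gRec md (u :: t) with
      | [] => [[v]]
      | h :: gs => (v :: h) :: gs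

theorem gRec_ne_nil (md : Int) (v : Int × Int) (l : List (Int × Int)) : gRec md (v :: l) ≠ [] := by
  cases l with
  | nil => simp [gRec]
  | cons u t =>
    simp only [gRec]
    split
    · simp
    · split <;> simp

-- ---- A side: the loop equals gRec on the filtered stream ----

-- A's grouping sub-loop in isolation
def gLoop (md : Int) : List (Int × Int) → List (List (Int × Int)) → List (Int × Int) → List (List (Int × Int))
  | [], g, c => if c = [] then g else g ++ [c]
  | v :: rest, g, c =>
    if c = [] ∨ v.2 - ((c.getLast?.getD (0, 0)).2) ≤ md then
      gLoop md rest g (c ++ [v])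
    else
      gLoop md rest (g ++ [c]) [v]

theorem xaLoop_eq (max_diff : Int) (values : List (Int × Int)) :
    ∀ (g : List (List (Int × Int))) (c z m : List (Int × Int)),
    xaLoop max_diff values g c z m =
      (gLoop max_diff (values.filter (fun v => v.2 ≠ 0 ∧ v.2 ≠ -1)) g c,
       z ++ values.filter (fun v => v.2 = 0),
       m ++ values.filter (fun v => v.2 = -1)) := by
  induction values with
  | nil => intro g c z m; simp [xaLoop, gLoop]
  | cons v rest ih =>
    intro g c z m
    by_cases h0 : v.2 = 0
    · simp [xaLoop, h0, ih, List.filter]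
    · by_cases h1 : v.2 = -1
      · simp [xaLoop, h1, ih, List.filter]
      · simp [xaLoop, gLoop, h0, h1, ih, List.filter]
        split <;> rfl

-- the glue of a pending current group onto the recursive grouping of the rest
def glue (md : Int) (l : List (Int × Int)) (c : List (Int × Int)) : List (List (Int × Int)) :=
  match l, gRec md l with
  | [], _ => [c]
  | _ :: _, [] => [c]
  | v :: _, h :: gs => if v.2 - ((c.getLast?.getD (0, 0)).2) ≤ md then (c ++ h) :: gs else c :: h :: gs

theorem glue_single (md : Int) (l : List (Int × Int)) (v : Int × Int) :
    glue md l [v] = gRec md (v :: l) := by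
  cases l with
  | nil => simp [glue, gRec]
  | cons u t =>
    unfold glue
    cases hg : gRec md (u :: t) with
    | nil => exact absurd hg (gRec_ne_nil md u t)
    | cons h gs =>
      simp only [gRec, hg, List.getLast?_singleton, Option.getD_some]
      by_cases hb : u.2 - v.2 > md
      · rw [if_neg (by omega), if_pos hb]
      · rw [if_pos (by omega), if_neg hb]
        simp

theorem glue_snoc (md : Int) (v : Int × Int) (rest c : List (Int × Int))
    (hcond : v.2 - ((c.getLast?.getD (0, 0)).2) ≤ md) :
    glue md rest (c ++ [v]) = glue md (v :: rest) c := by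
  have hlast : ((c ++ [v]).getLast?.getD (0, 0)) = v := by
    rw [List.getLast?_concat]; rfl
  cases rest with
  | nil =>
    unfold glue
    simp only [gRec, if_pos hcond]
  | cons u t =>
    cases hg : gRec md (u :: t) with
    | nil => exact absurd hg (gRec_ne_nil md u t)
    | cons h gs =>
      by_cases hb : u.2 - v.2 > md
      · have hgr : gRec md (v :: u :: t) = [v] :: h :: gs := by
          rw [gRec, if_pos hb, hg]
        unfold glue
        rw [hg, hgr]
        simp only [hlast, if_neg (by omega : ¬ u.2 - v.2 ≤ md), if_pos hcond]
      · have hgr : gRec md (v :: u :: t) = (v :: h) :: gs := by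
          rw [gRec, if_neg hb, hg]
        unfold glue
        rw [hg, hgr]
        simp only [hlast, if_pos (by omega : u.2 - v.2 ≤ md), if_pos hcond]
        simp

theorem gLoop_inv (md : Int) (l : List (Int × Int)) :
    ∀ (g : List (List (Int × Int))) (c : List (Int × Int)), c ≠ [] →
      gLoop md l g c = g ++ glue md l c := by
  induction l with
  | nil => intro g c hc; simp [gLoop, glue, hc]
  | cons v rest ih =>
    intro g c hc
    simp only [gLoop, hc, false_or]
    by_cases hcond : v.2 - ((c.getLast?.getD (0, 0)).2) ≤ md
    · rw [if_pos hcond, ih g (c ++ [v]) (by simp), glue_snoc md v rest c hcond]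
    · rw [if_neg hcond, ih (g ++ [c]) [v] (by simp), glue_single]
      cases hg : gRec md (v :: rest) with
      | nil => exact absurd hg (gRec_ne_nil md v rest)
      | cons h gs =>
        unfold glue
        rw [hg]
        simp only [if_neg hcond]
        simp

theorem gLoop_eq_gRec (md : Int) (l : List (Int × Int)) : gLoop md l [] [] = gRec md l := by
  cases l with
  | nil => simp [gLoop, gRec]
  | cons v rest =>
    have h1 : gLoop md (v :: rest) [] [] = gLoop md rest [] [v] := by simp [gLoop]
    rw [h1, gLoop_inv md rest [] [v] (by simp), glue_single]
    simp

-- ---- B side: the cut/slice construction equals gRec ----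

def cutsOf (md : Int) (xs : List (Int × Int)) : List Int :=
  ((PySem.List.enumerate (xs.zip xs.tail) 0).filter
    (fun p => decide (p.2.2.2 - p.2.1.2 > md))).map (fun p => p.1 + 1)

def boundsOf (md : Int) (xs : List (Int × Int)) : List Int :=
  0 :: (cutsOf md xs ++ [(xs.length : Int)])

def sliceGroups (md : Int) (xs : List (Int × Int)) : List (List (Int × Int)) :=
  ((boundsOf md xs).zip (boundsOf md xs).tail).map
    (fun ab => PySem.List.slice xs (some ab.1) (some ab.2))

theorem enumerate_shift {α : Type} (l : List α) :
    ∀ s : Int, PySem.List.enumerate l (s + 1) = (PySem.List.enumerate l s).map (fun p => (p.1 + 1, p.2)) := by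
  induction l with
  | nil => intro s; simp [PySem.List.enumerate_nil]
  | cons x xs ih =>
    intro s
    rw [PySem.List.enumerate_cons, PySem.List.enumerate_cons, List.map_cons, ih (s + 1)]

theorem cuts_shift (md : Int) (v u : Int × Int) (t : List (Int × Int)) :
    cutsOf md (v :: u :: t) =
      (if u.2 - v.2 > md then [(1 : Int)] else []) ++ (cutsOf md (u :: t)).map (· + 1) := by
  have hes : PySem.List.enumerate ((u :: t).zip t) 1 =
      (PySem.List.enumerate ((u :: t).zip t) 0).map (fun p => (p.1 + 1, p.2)) := by
    have h := enumerate_shift ((u :: t).zip t) 0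
    norm_num at h
    exact h
  unfold cutsOf
  simp only [List.tail_cons, List.zip_cons_cons, PySem.List.enumerate_cons]
  norm_num [hes]
  by_cases hb : u.2 - v.2 > md <;>
    simp [hb, List.filter_map, List.map_map, Function.comp_def]

theorem enum_fst_le {α : Type} (l : List α) :
    ∀ (s : Int), ∀ p ∈ PySem.List.enumerate l s, s ≤ p.1 := by
  induction l with
  | nil => intro s p hp; simp [PySem.List.enumerate_nil] at hp
  | cons x xs ih =>
    intro s p hp
    rw [PySem.List.enumerate_cons] at hp
    rcases List.mem_cons.mp hp with h | h
    · subst h; simp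
    · have := ih (s + 1) p h; omega

theorem bounds_nonneg (md : Int) (xs : List (Int × Int)) :
    ∀ b ∈ boundsOf md xs, 0 ≤ b := by
  intro b hb
  unfold boundsOf at hb
  rcases List.mem_cons.mp hb with h | h
  · omega
  · rcases List.mem_append.mp h with h | h
    · unfold cutsOf at h
      rcases List.mem_map.mp h with ⟨p, hp, rfl⟩
      have := enum_fst_le _ 0 p (List.mem_of_mem_filter hp)
      omega
    · simp at h; omega

theorem slice_cons_succ {v : Int × Int} {xs : List (Int × Int)} {a b : Int}
    (ha : 0 ≤ a) (hb : 0 ≤ b) :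
    PySem.List.slice (v :: xs) (some (a + 1)) (some (b + 1)) = PySem.List.slice xs (some a) (some b) := by
  rw [PySem.List.slice_toNat _ (by omega) (by omega), PySem.List.slice_toNat _ ha hb]
  have h1 : (a + 1).toNat = a.toNat + 1 := by omega
  have h2 : (b + 1).toNat = b.toNat + 1 := by omega
  rw [h1, h2, List.drop_succ_cons]
  congr 1
  omega

theorem slice_zero_succ {v : Int × Int} {xs : List (Int × Int)} {b : Int} (hb : 0 ≤ b) :
    PySem.List.slice (v :: xs) (some 0) (some (b + 1)) = v :: PySem.List.slice xs (some 0) (some b) := by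
  rw [PySem.List.slice_toNat _ (by omega) (by omega), PySem.List.slice_toNat _ (by omega) hb]
  have h2 : (b + 1).toNat = b.toNat + 1 := by omega
  simp [h2]

theorem map_slice_shift (v : Int × Int) (xs : List (Int × Int)) (P L : List Int)
    (hP : ∀ b ∈ P, 0 ≤ b) (hL : ∀ b ∈ L, 0 ≤ b) :
    ((P.map (fun x => x + 1)).zip (L.map (fun x => x + 1))).map
        (fun ab => PySem.List.slice (v :: xs) (some ab.1) (some ab.2)) =
      (P.zip L).map (fun ab => PySem.List.slice xs (some ab.1) (some ab.2)) := by
  rw [List.zip_map, List.map_map]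
  apply List.map_congr_left
  rintro ⟨a, b⟩ hp
  have hmem := List.of_mem_zip hp
  simp only [Function.comp_def, Prod.map]
  exact slice_cons_succ (hP a hmem.1) (hL b hmem.2)

theorem sliceGroups_eq (md : Int) (xs : List (Int × Int)) (h : xs ≠ []) :
    sliceGroups md xs = gRec md xs := by
  induction xs with
  | nil => exact absurd rfl h
  | cons v xs ih =>
    cases xs with
    | nil =>
      unfold sliceGroups boundsOf cutsOf
      simp only [List.zip_nil_right, PySem.List.enumerate_nil, List.filter_nil, List.map_nil,
        List.nil_append, List.length_cons, List.length_nil, List.tail_cons, List.zip_cons_cons,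
        List.zip_nil_right, List.map_cons]
      rw [gRec]
      norm_num
      rw [PySem.List.slice_to _ (by omega)]
      simp
    | cons u t =>
      have ih' := ih (by simp)
      obtain ⟨r0, R', hR⟩ := List.ne_nil_iff_exists_cons.mp
        (show cutsOf md (u :: t) ++ [(((u :: t).length : Nat) : Int)] ≠ [] by simp)
      have hlen : (((v :: u :: t).length : Nat) : Int) = (((u :: t).length : Nat) : Int) + 1 := by
        push_cast [List.length_cons]; ring
      have hBtail : boundsOf md (u :: t) = 0 :: r0 :: R' := by rw [boundsOf, hR]
      have hBnn := bounds_nonneg md (u :: t)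
      rw [hBtail] at hBnn
      have hRnn : ∀ b ∈ (r0 :: R'), 0 ≤ b := fun b hb => hBnn b (List.mem_cons_of_mem _ hb)
      have hR'nn : ∀ b ∈ R', 0 ≤ b := fun b hb => hRnn b (List.mem_cons_of_mem _ hb)
      have hr0 : 0 ≤ r0 := hRnn r0 List.mem_cons_self
      have htail : sliceGroups md (u :: t) =
          PySem.List.slice (u :: t) (some 0) (some r0) ::
            ((r0 :: R').zip R').map
              (fun ab => PySem.List.slice (u :: t) (some ab.1) (some ab.2)) := by
        rw [sliceGroups, hBtail]
        simp only [List.tail_cons, List.zip_cons_cons, List.map_cons]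
      have hgt : gRec md (u :: t) =
          PySem.List.slice (u :: t) (some 0) (some r0) ::
            ((r0 :: R').zip R').map
              (fun ab => PySem.List.slice (u :: t) (some ab.1) (some ab.2)) := by
        rw [← ih', htail]
      by_cases hb : u.2 - v.2 > md
      · -- a cut right after v
        have hbounds : boundsOf md (v :: u :: t) =
            0 :: ((0 :: r0 :: R').map (fun x => x + 1)) := by
          rw [boundsOf, cuts_shift md v u t, if_pos hb, hlen, ← hR]
          simp
        have hshift := map_slice_shift v (u :: t) (0 :: r0 :: R') (r0 :: R') hBnn hRnn
        simp only [List.map_cons] at hshift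
        have hgr : gRec md (v :: u :: t) =
            [v] :: PySem.List.slice (u :: t) (some 0) (some r0) ::
              ((r0 :: R').zip R').map
                (fun ab => PySem.List.slice (u :: t) (some ab.1) (some ab.2)) := by
          rw [gRec, if_pos hb, hgt]
        rw [sliceGroups, hbounds]
        simp only [List.map_cons, List.tail_cons, List.zip_cons_cons]
        rw [hgr]
        congr 1
      · -- no cut: the first group absorbs v
        have hbounds : boundsOf md (v :: u :: t) =
            0 :: ((r0 :: R').map (fun x => x + 1)) := by
          rw [boundsOf, cuts_shift md v u t, if_neg hb, hlen, ← hR]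
          simp
        have hshift := map_slice_shift v (u :: t) (r0 :: R') R' hRnn hR'nn
        simp only [List.map_cons] at hshift
        have hgr : gRec md (v :: u :: t) =
            (v :: PySem.List.slice (u :: t) (some 0) (some r0)) ::
              ((r0 :: R').zip R').map
                (fun ab => PySem.List.slice (u :: t) (some ab.1) (some ab.2)) := by
          rw [gRec, if_neg hb, hgt]
        rw [sliceGroups, hbounds]
        simp only [List.map_cons, List.tail_cons, List.zip_cons_cons]
        rw [hgr]
        congr 1
        exact slice_zero_succ hr0

theorem gLoop_eq_slices (md : Int) (ns : List (Int × Int)) :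
    gLoop md ns [] [] = (if ns = [] then [] else sliceGroups md ns) := by
  rw [gLoop_eq_gRec]
  by_cases h : ns = []
  · simp [h, gRec]
  · rw [if_neg h, sliceGroups_eq md ns h]

-- ===== VERDICT (by name: the statement is the Claim_ definition above) =====
theorem xacdinh_da_spec : Claim_equal_xacdinh_da := by
  intro values max_diff _
  unfold Spec_xacdinh_da xacdinh_da xacdinh_da_alt
  rw [xaLoop_eq, gLoop_eq_slices]
  simp only [List.nil_append]
  rfl
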